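-- pv_equiv track=rewrite | github.com/majidghgol/tabvec | embedding/clustering/EvaluateClustering2.py | cluster_to_label
-- ===== SOURCE A (Python) =====
-- def cluster_to_label(clusters, true_labels):
--     cl2label = dict()
--     for c,l in zip(clusters, true_labels):
--
--         if c not in cl2label:
--             cl2label[c] = []
--         cl2label[c].append(l)
--     for c in cl2label.keys():
--         # find majority
--         ll = cl2label[c]
--         counts = dict()
--         for l in ll:
--             if l not in counts:
--                 counts[l] = 0
--             counts[l] += 1
--         label = ll[0]
--         for l in ll:
--             if counts[label] < counts[l]:
--                 label = l
--         # print '{} won in {} to {} race'.format(label, counts[label], len(ll))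
--         cl2label[c] = label
--     pred_labels = [cl2label[c] for c in clusters]
--     return pred_labels
-- ===== SOURCE B (Python) =====
-- def cluster_to_label(clusters, true_labels):
--     pair_counts = {}
--     for p in zip(clusters, true_labels):
--         pair_counts[p] = pair_counts.get(p, 0) + 1
--     best = {}
--     for (c, l), n in pair_counts.items():
--         if c not in best or best[c][0] < n:
--             best[c] = (n, l)
--     return [best[c][1] for c in clusters]
-- ===== Notes on version B (the rewrite author's own statement) =====
-- stated objective: alternative
-- what changed: B never builds per-cluster label lists or runs A's nested per-cluster count-then-scan loops: it counts (cluster,label) PAIRS in one flat dict, then a single streaming pass over that dict's items (first-occurrence order) keeps the best (count,label) per cluster with strict improvement, which reproduces A's first-seen tie-break.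
-- outside the precondition, e.g. on cluster_to_label([5], []): A raises KeyError, B raises KeyError
import Mathlib
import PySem

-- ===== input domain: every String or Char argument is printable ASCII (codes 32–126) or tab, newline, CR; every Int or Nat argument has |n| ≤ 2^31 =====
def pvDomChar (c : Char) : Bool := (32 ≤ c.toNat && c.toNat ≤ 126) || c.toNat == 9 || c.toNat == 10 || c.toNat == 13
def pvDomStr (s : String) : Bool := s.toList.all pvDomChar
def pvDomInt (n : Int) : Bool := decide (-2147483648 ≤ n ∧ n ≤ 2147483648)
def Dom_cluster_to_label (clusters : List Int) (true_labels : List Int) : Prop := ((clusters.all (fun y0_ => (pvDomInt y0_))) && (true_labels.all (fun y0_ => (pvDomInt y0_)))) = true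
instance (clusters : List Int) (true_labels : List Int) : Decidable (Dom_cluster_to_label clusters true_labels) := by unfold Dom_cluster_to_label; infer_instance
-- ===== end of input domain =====

-- B replaces A's group-then-recount scheme by one flat counter over (cluster,label) PAIRS
-- followed by a single streaming argmax pass over its items; objective: a different
-- decomposition of the same O(n) task (no per-cluster label lists, no nested count loop).


-- ===== PORT A =====
-- A's first loop: group labels by cluster (setdefault-to-[] then append)
def pvGroupA (zs : List (Int × Int)) : PySem.Dict Int (List Int) :=
  zs.foldl
    (fun d p =>
      let d := if d.contains p.1 then d else d.insert p.1 ([] : List Int)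
      d.modify p.1 [] (fun ll => ll ++ [p.2]))
    PySem.Dict.empty

-- A's inner counting loop over one cluster's label list
def pvCountsA (ll : List Int) : PySem.Dict Int Int :=
  ll.foldl
    (fun cd l =>
      let cd := if cd.contains l then cd else cd.insert l 0
      cd.modify l 0 (· + 1))
    PySem.Dict.empty

-- A's majority scan: label = ll[0]; for l in ll: if counts[label] < counts[l]: label = l
-- (ll[0] : ll is nonempty for every key of the grouping dict, so the IndexError arm is dead)
def pvMajorityA (ll : List Int) : Int :=
  let counts := pvCountsA ll
  ll.foldl (fun lab l => if counts.getD lab 0 < counts.getD l 0 then l else lab)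
    ((PySem.List.pyGet? ll 0).getD 0)

-- Python's second loop overwrites cl2label[c] (a list) with an int; since keys are unique and
-- each key is visited once, it is ported as building a fresh Int-valued dict while reading the
-- untouched list values from the first dict.  Final cl2label[c]: KeyError iff c is not a key,
-- excluded by Pre_.
def cluster_to_label (clusters : List Int) (true_labels : List Int) : List Int :=
  let cl2label := pvGroupA (clusters.zip true_labels)
  let cl2label2 :=
    cl2label.keys.foldl (fun d c => d.insert c (pvMajorityA (cl2label.getD c []))) PySem.Dict.empty
  clusters.map (fun c => cl2label2.getD c 0)

-- ===== PORT B =====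
-- B: one flat counter keyed by the (cluster, label) pair; then one streaming pass over its
-- items in insertion (= first-occurrence) order keeping per cluster the best (count, label)
-- with strict improvement; best[c]: KeyError iff c is not a key, excluded by Pre_.
def cluster_to_label_alt (clusters : List Int) (true_labels : List Int) : List Int :=
  let pair_counts := (clusters.zip true_labels).foldl
    (fun d p => d.insert p (d.getD p 0 + 1)) PySem.Dict.empty
  let best := pair_counts.items.foldl
    (fun b q =>
      if !b.contains q.1.1 || (b.getD q.1.1 (0, 0)).1 < q.2
      then b.insert q.1.1 (q.2, q.1.2) else b)
    (PySem.Dict.empty : PySem.Dict Int (Int × Int))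
  clusters.map (fun c => (best.getD c (0, 0)).2)

-- ===== PRECONDITION & SPEC =====
-- Pre_ excludes exactly the inputs where BOTH Pythons raise KeyError: some cluster id occurs
-- only past the end of true_labels (zip truncation), so it never becomes a dict key.
def Pre_cluster_to_label (clusters : List Int) (true_labels : List Int) : Prop :=
  ∀ c ∈ clusters, c ∈ (clusters.zip true_labels).map Prod.fst
instance (clusters : List Int) (true_labels : List Int) : Decidable (Pre_cluster_to_label clusters true_labels) := by unfold Pre_cluster_to_label; infer_instance

def pvWitness_cluster_to_label : List Int × List Int := ([0, 1, 0, 1, 1], [7, 8, 9, 8, 7])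

def Spec_cluster_to_label (clusters : List Int) (true_labels : List Int) (out : List Int) : Prop := out = cluster_to_label_alt clusters true_labels
instance (clusters : List Int) (true_labels : List Int) (out : List Int) : Decidable (Spec_cluster_to_label clusters true_labels out) := by unfold Spec_cluster_to_label; infer_instance

-- ===== CLAIM (what is proved, stated in full; the proofs are below) =====
def Claim_equal_cluster_to_label : Prop := ∀ (clusters : List Int) (true_labels : List Int), Dom_cluster_to_label clusters true_labels → Pre_cluster_to_label clusters true_labels → Spec_cluster_to_label clusters true_labels (cluster_to_label clusters true_labels)

-- ===== LEMMAS AND PROOFS =====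

-- the running max?-fold with a some accumulator is the strict-improvement scan
lemma max?_foldl_some {α : Type} (f : α → Int) (l : List α) (m : α) :
    l.foldl
      (fun acc x => match acc with
        | none => some x
        | some m => if f m < f x then some x else some m)
      (some m)
    = some (l.foldl (fun m y => if f m < f y then y else m) m) := by
  induction l generalizing m with
  | nil => rfl
  | cons x t ih =>
    simp only [List.foldl_cons]
    by_cases h : f m < f x <;> simp [h, ih]

lemma max?_cons {α : Type} (f : α → Int) (x : α) (t : List α) :
    PySem.List.max? (x :: t) f = some (t.foldl (fun m y => if f m < f y then y else m) x) := by
  unfold PySem.List.max?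
  rw [List.foldl_cons]
  exact max?_foldl_some f t x

-- first-max over a list equals first-max over its ordered dedup (duplicates share their key)
lemma max?_ofList {α : Type} [BEq α] [LawfulBEq α] (f : α → Int) (xs : List α) :
    PySem.List.max? (PySem.Set.ofList xs) f = PySem.List.max? xs f := by
  induction xs using List.reverseRecOn with
  | nil => rfl
  | append_singleton xs x ih =>
    have hof : PySem.Set.ofList (xs ++ [x]) = PySem.Set.add (PySem.Set.ofList xs) x := by
      simp [PySem.Set.ofList, List.foldl_append, PySem.Set.add]
    have hstep : ∀ (l : List α),
        PySem.List.max? (l ++ [x]) f =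
          (match PySem.List.max? l f with
            | none => some x
            | some m => if f m < f x then some x else some m) := by
      intro l
      unfold PySem.List.max?
      rw [List.foldl_append]
      rfl
    by_cases hx : x ∈ xs
    · have hxs : PySem.Set.add (PySem.Set.ofList xs) x = PySem.Set.ofList xs := by
        simp [PySem.Set.add, PySem.Set.contains, PySem.Set.mem_ofList, hx]
      have hne : xs ≠ [] := List.ne_nil_of_mem hx
      obtain ⟨m, hm⟩ : ∃ m, PySem.List.max? xs f = some m := by
        cases h : PySem.List.max? xs f with
        | none => exact absurd ((PySem.List.max?_eq_none_iff xs f).mp h) hne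
        | some m => exact ⟨m, rfl⟩
      have hle : f x ≤ f m := PySem.List.max?_isMax hm x hx
      rw [hof, hxs, ih, hstep, hm]
      simp [not_lt.mpr hle]
    · have hxs : PySem.Set.add (PySem.Set.ofList xs) x = PySem.Set.ofList xs ++ [x] := by
        simp [PySem.Set.add, PySem.Set.contains, PySem.Set.mem_ofList, hx]
      rw [hof, hxs, hstep, hstep, ih]

-- A's inner counting loop is Counter
lemma inner_counts_eq_counter (ll : List Int) : pvCountsA ll = PySem.Dict.counter ll := by
  unfold pvCountsA
  rw [PySem.Dict.counter_eq_foldl]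
  apply PySem.List.foldl_congr_mem
  intro cd l _
  by_cases h : cd.contains l
  · simp [h]
  · simp only [h, Bool.false_eq_true, if_false]
    simp [PySem.Dict.modify, PySem.Dict.insert_insert_self, PySem.Dict.getD_insert_self,
      PySem.Dict.getD_of_not_contains _ _ (by simpa using h)]

-- A's grouping loop is the plain modify-append loop
lemma group_eq_modify (zs : List (Int × Int)) :
    pvGroupA zs
    = zs.foldl (fun d p => d.modify p.1 [] (fun ll => ll ++ [p.2])) PySem.Dict.empty := by
  unfold pvGroupA
  apply PySem.List.foldl_congr_mem
  intro d p _
  by_cases h : d.contains p.1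
  · simp [h]
  · simp only [h, Bool.false_eq_true, if_false]
    simp [PySem.Dict.modify, PySem.Dict.insert_insert_self, PySem.Dict.getD_insert_self,
      PySem.Dict.getD_of_not_contains _ _ (by simpa using h)]

lemma groupA_getD (zs : List (Int × Int)) (c : Int) :
    (pvGroupA zs).getD c [] = (zs.filter (fun p => p.1 == c)).map Prod.snd := by
  rw [group_eq_modify]
  simpa using PySem.Dict.getD_foldl_modify_append (l := zs) (d := PySem.Dict.empty) (c := c)

lemma groupA_keys (zs : List (Int × Int)) :
    (pvGroupA zs).keys = PySem.Set.ofList (zs.map Prod.fst) := by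
  rw [group_eq_modify,
    PySem.Dict.keys_foldl_modify_key zs Prod.fst [] (fun _ p ll => ll ++ [p.2]) PySem.Dict.empty]
  simp [PySem.Dict.keys_empty, PySem.Set.ofList, PySem.Set.update]

-- a fresh distinct-key insert loop from empty, looked up at a key it visited
lemma getD_foldl_insert_fresh {α : Type} (ks : List Int) (v : Int → α) (hnd : ks.Nodup)
    (c : Int) (hc : c ∈ ks) (dflt : α) :
    (ks.foldl (fun d k => d.insert k (v k)) (PySem.Dict.empty : PySem.Dict Int α)).getD c dflt
    = v c := by
  have hitems : (ks.foldl (fun d k => d.insert k (v k)) (PySem.Dict.empty : PySem.Dict Int α)).items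
      = PySem.Dict.empty.items ++ ks.map (fun k => (k, v k)) :=
    PySem.Dict.items_foldl_insert_fresh ks (fun k => k) v PySem.Dict.empty
      (by intro a _; simp [PySem.Dict.contains_empty]) (by simpa using hnd)
  have hnodup : (ks.foldl (fun d k => d.insert k (v k)) (PySem.Dict.empty : PySem.Dict Int α)).keys.Nodup :=
    PySem.Dict.nodup_keys_foldl_insert _ _ _ (by simp [PySem.Dict.keys_empty])
  refine PySem.Dict.getD_of_mem_items _ ?_ hnodup dflt
  rw [hitems]
  exact List.mem_append_right _ (List.mem_map.mpr ⟨c, hc, rfl⟩)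

-- the per-key trace of B's streaming-argmax loop: the value at key c after the fold is the
-- strict-improvement Option-fold over exactly the items whose key is c
lemma best_get? (qs : List ((Int × Int) × Int)) (b : PySem.Dict Int (Int × Int)) (c : Int) :
    (qs.foldl
      (fun b q =>
        if !b.contains q.1.1 || (b.getD q.1.1 (0, 0)).1 < q.2
        then b.insert q.1.1 (q.2, q.1.2) else b)
      b).get? c
    = (qs.filter (fun q => q.1.1 == c)).foldl
        (fun o q => match o with
          | none => some (q.2, q.1.2)
          | some s => if s.1 < q.2 then some (q.2, q.1.2) else some s)
        (b.get? c) := by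
  induction qs generalizing b with
  | nil => rfl
  | cons q t ih =>
    simp only [List.foldl_cons, List.filter_cons]
    by_cases hk : q.1.1 = c
    · have hb : (q.1.1 == c) = true := by simpa using hk
      rw [hb, if_pos rfl, List.foldl_cons, ih]
      congr 1
      cases hg : b.get? c with
      | none =>
        have hcon : b.contains q.1.1 = false := by
          rw [hk, PySem.Dict.contains_eq_isSome_get?, hg]; rfl
        subst hk
        simp [hcon, PySem.Dict.get?_insert_self]
      | some s =>
        have hcon : b.contains q.1.1 = true := by
          rw [hk, PySem.Dict.contains_eq_isSome_get?, hg]; rfl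
        have hgd : b.getD q.1.1 (0, 0) = s := by
          rw [hk, PySem.Dict.getD_eq_get?_getD, hg]; rfl
        subst hk
        by_cases hlt : s.1 < q.2 <;>
          simp [hcon, hgd, hlt, hg, PySem.Dict.get?_insert_self]
    · have hb : (q.1.1 == c) = false := by simpa using hk
      rw [hb]
      simp only [Bool.false_eq_true, if_false]
      rw [ih]
      congr 1
      by_cases hc : !b.contains q.1.1 || (b.getD q.1.1 (0, 0)).1 < q.2
      · rw [if_pos hc, PySem.Dict.get?_insert_of_ne _ _ (fun h => hk h.symm)]
      · rw [if_neg hc]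

-- the Option-fold over pair items of one cluster is the max?-fold over the labels, mapped
lemma stepc_map (c : Int) (f : Int → Int) (L : List Int) (o : Option Int) :
    (L.map (fun l => ((c, l), f l))).foldl
      (fun o q => match o with
        | none => some (q.2, q.1.2)
        | some s => if s.1 < q.2 then some (q.2, q.1.2) else some s)
      (o.map (fun l => (f l, l)))
    = (L.foldl
        (fun acc x => match acc with
          | none => some x
          | some m => if f m < f x then some x else some m)
        o).map (fun l => (f l, l)) := by
  induction L generalizing o with
  | nil => rfl
  | cons x t ih =>
    simp only [List.map_cons, List.foldl_cons]
    cases o with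
    | none => exact ih (some x)
    | some m =>
      by_cases h : f m < f x
      · simp only [Option.map_some, h, if_true]
        exact ih (some x)
      · simp only [Option.map_some, h, if_false]
        exact ih (some m)

-- first-occurrence dedup commutes with filter
lemma ofList_filter {α : Type} [BEq α] [LawfulBEq α] (p : α → Bool) (xs : List α) :
    (PySem.Set.ofList xs).filter p = PySem.Set.ofList (xs.filter p) := by
  induction xs using List.reverseRecOn with
  | nil => rfl
  | append_singleton xs x ih =>
    have hof : ∀ (l : List α), PySem.Set.ofList (l ++ [x]) = PySem.Set.add (PySem.Set.ofList l) x := by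
      intro l; simp [PySem.Set.ofList, List.foldl_append, PySem.Set.add]
    rw [hof, List.filter_append]
    by_cases hp : p x
    · simp only [List.filter_cons, hp, if_true, List.filter_nil]
      by_cases hx : x ∈ xs
      · have h1 : PySem.Set.add (PySem.Set.ofList xs) x = PySem.Set.ofList xs := by
          simp [PySem.Set.add, PySem.Set.contains, PySem.Set.mem_ofList, hx]
        have hx2 : x ∈ xs.filter p := List.mem_filter.mpr ⟨hx, hp⟩
        have h2 : PySem.Set.ofList (xs.filter p ++ [x]) = PySem.Set.ofList (xs.filter p) := by
          rw [hof]
          simp [PySem.Set.add, PySem.Set.contains, PySem.Set.mem_ofList, hx2]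
        rw [h1, h2, ih]
      · have h1 : PySem.Set.add (PySem.Set.ofList xs) x = PySem.Set.ofList xs ++ [x] := by
          simp [PySem.Set.add, PySem.Set.contains, PySem.Set.mem_ofList, hx]
        have hx2 : x ∉ xs.filter p := fun h => hx (List.mem_of_mem_filter h)
        have h2 : PySem.Set.ofList (xs.filter p ++ [x]) = PySem.Set.ofList (xs.filter p) ++ [x] := by
          rw [hof]
          simp [PySem.Set.add, PySem.Set.contains, PySem.Set.mem_ofList, hx2]
        rw [h1, h2, List.filter_append, ih]
        simp [hp]
    · have hpb : p x = false := by simpa using hp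
      simp only [List.filter_cons, hpb, Bool.false_eq_true, if_false, List.filter_nil,
        List.append_nil]
      by_cases hx : x ∈ xs
      · have h1 : PySem.Set.add (PySem.Set.ofList xs) x = PySem.Set.ofList xs := by
          simp [PySem.Set.add, PySem.Set.contains, PySem.Set.mem_ofList, hx]
        rw [h1, ih]
      · have h1 : PySem.Set.add (PySem.Set.ofList xs) x = PySem.Set.ofList xs ++ [x] := by
          simp [PySem.Set.add, PySem.Set.contains, PySem.Set.mem_ofList, hx]
        rw [h1, List.filter_append, ih]
        simp [hpb]

-- first-occurrence dedup commutes with an injective map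
lemma ofList_map_pair (c : Int) (xs : List Int) :
    PySem.Set.ofList (xs.map (fun l => ((c, l) : Int × Int)))
    = (PySem.Set.ofList xs).map (fun l => ((c, l) : Int × Int)) := by
  induction xs using List.reverseRecOn with
  | nil => rfl
  | append_singleton xs x ih =>
    have hof : ∀ {α : Type} [BEq α] (l : List α) (y : α),
        PySem.Set.ofList (l ++ [y]) = PySem.Set.add (PySem.Set.ofList l) y := by
      intro α _ l y; simp [PySem.Set.ofList, List.foldl_append, PySem.Set.add]
    rw [List.map_append, List.map_singleton, hof, hof]
    by_cases hx : x ∈ xs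
    · have hx2 : ((c, x) : Int × Int) ∈ xs.map (fun l => ((c, l) : Int × Int)) :=
        List.mem_map.mpr ⟨x, hx, rfl⟩
      have hx3 : ((c, x) : Int × Int) ∈ PySem.Set.ofList (xs.map (fun l => ((c, l) : Int × Int))) := by
        rw [PySem.Set.mem_ofList]; exact hx2
      simp [PySem.Set.add, PySem.Set.contains, PySem.Set.mem_ofList, hx, ih]
    · have hx2 : ((c, x) : Int × Int) ∉ xs.map (fun l => ((c, l) : Int × Int)) := by
        intro h
        obtain ⟨y, hy, he⟩ := List.mem_map.mp h
        exact hx (by cases he; exact hy)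
      have hx3 : ((c, x) : Int × Int) ∉ PySem.Set.ofList (xs.map (fun l => ((c, l) : Int × Int))) := by
        rw [PySem.Set.mem_ofList]; exact hx2
      simp [PySem.Set.add, PySem.Set.contains, PySem.Set.mem_ofList, hx, ih]

-- every pair of a cluster's slice is (c, its label)
lemma filter_fst_eq (zs : List (Int × Int)) (c : Int) :
    zs.filter (fun p => p.1 == c)
    = ((zs.filter (fun p => p.1 == c)).map Prod.snd).map (fun l => ((c, l) : Int × Int)) := by
  induction zs with
  | nil => rfl
  | cons p t ih =>
    obtain ⟨p1, p2⟩ := p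
    by_cases h : p1 = c
    · subst h
      simp only [List.filter_cons, beq_self_eq_true, if_true, List.map_cons]
      exact congrArg _ ih
    · have hb : (((p1, p2) : Int × Int).1 == c) = false := by simpa using h
      simp only [List.filter_cons, hb, Bool.false_eq_true, if_false]
      exact ih

-- pair counts restricted to one cluster are label counts
lemma count_pair (zs : List (Int × Int)) (c l : Int) :
    zs.count ((c, l) : Int × Int)
    = ((zs.filter (fun p => p.1 == c)).map Prod.snd).count l := by
  have h2 : (zs.filter (fun p => p.1 == c)).count ((c, l) : Int × Int)
      = ((zs.filter (fun p => p.1 == c)).map Prod.snd).count l := by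
    conv_lhs => rw [filter_fst_eq zs c]
    exact List.count_map_of_injective _ _ (fun a b h => by simpa using h) l
  rw [← h2]
  exact (List.count_filter (by simp)).symm

-- the majority label both sides compute for one (nonempty) cluster's label list
lemma majorityA_eq_max? (ll : List Int) (h : ll ≠ []) :
    pvMajorityA ll
    = (PySem.List.max? (PySem.Set.ofList ll) (fun l => ((ll.count l : Int)))).getD 0 := by
  obtain ⟨x, t, rfl⟩ := List.exists_cons_of_ne_nil h
  have hcnt : ∀ (v : Int), (PySem.Dict.counter (x :: t)).getD v 0 = ((x :: t).count v : Int) :=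
    fun v => PySem.Dict.getD_counter (x :: t) v
  unfold pvMajorityA
  rw [inner_counts_eq_counter]
  simp only [hcnt]
  rw [max?_ofList, max?_cons]
  have hx0 : (PySem.List.pyGet? (x :: t) 0).getD 0 = x := by
    simp [PySem.List.pyGet?, PySem.List.pyIdx?]
  rw [hx0, List.foldl_cons, if_neg (lt_irrefl _)]
  simp

theorem cluster_to_label_spec : Claim_equal_cluster_to_label := by
  intro clusters true_labels _ hpre
  unfold Spec_cluster_to_label cluster_to_label cluster_to_label_alt
  set zs := clusters.zip true_labels with hzs
  apply List.map_congr_left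
  intro c hc
  have hmem : c ∈ zs.map Prod.fst := hpre c hc
  set ll := (zs.filter (fun q => q.1 == c)).map Prod.snd with hll_def
  -- the cluster's label list is nonempty
  obtain ⟨p, hp, hpc⟩ := List.mem_map.mp hmem
  have hll : ll ≠ [] := by
    have hpf : p ∈ zs.filter (fun q => q.1 == c) :=
      List.mem_filter.mpr ⟨hp, by simp [hpc]⟩
    exact List.ne_nil_of_mem (List.mem_map_of_mem hpf)
  -- A's side
  have hAnd : (pvGroupA zs).keys.Nodup := by
    rw [groupA_keys]; exact PySem.Set.nodup_ofList _
  have hAc : c ∈ (pvGroupA zs).keys := by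
    rw [groupA_keys]; exact (PySem.Set.mem_ofList _ _).mpr hmem
  have hA : ((pvGroupA zs).keys.foldl
      (fun d c => d.insert c (pvMajorityA ((pvGroupA zs).getD c []))) PySem.Dict.empty).getD c 0
      = pvMajorityA ll := by
    rw [getD_foldl_insert_fresh _ _ hAnd c hAc 0, groupA_getD]
  rw [hA, majorityA_eq_max? ll hll]
  -- B's side
  rw [PySem.Dict.foldl_insert_getD_add_one_eq_counter, PySem.Dict.items_counter,
    PySem.Dict.getD_eq_get?_getD, best_get?, PySem.Dict.get?_empty, List.filter_map]
  have hfc : ((PySem.Set.ofList zs).filter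
        ((fun q => q.1.1 == c) ∘ (fun k => (k, (zs.count k : Int)))))
      = (PySem.Set.ofList ll).map (fun l => ((c, l) : Int × Int)) := by
    have hcomp : ((fun q => q.1.1 == c) ∘ (fun (k : Int × Int) => (k, (zs.count k : Int))))
        = fun (k : Int × Int) => k.1 == c := rfl
    rw [hcomp, ofList_filter, filter_fst_eq zs c, ← hll_def, ofList_map_pair]
  rw [hfc, List.map_map]
  have hmapeq : ((PySem.Set.ofList ll).map ((fun k => (k, (zs.count k : Int))) ∘ (fun l => ((c, l) : Int × Int))))
      = (PySem.Set.ofList ll).map (fun l => (((c, l) : Int × Int), ((ll.count l : Int)))) := by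
    apply List.map_congr_left
    intro l _
    simp only [Function.comp]
    rw [count_pair zs c l, ← hll_def]
  rw [hmapeq]
  have hstep := stepc_map c (fun l => ((ll.count l : Int))) (PySem.Set.ofList ll) none
  simp only [Option.map_none] at hstep
  rw [hstep]
  -- the max?-fold from none IS max?
  have hmax : ((PySem.Set.ofList ll).foldl
      (fun acc x => match acc with
        | none => some x
        | some m => if ((ll.count m : Int)) < ((ll.count x : Int)) then some x else some m)
      none) = PySem.List.max? (PySem.Set.ofList ll) (fun l => ((ll.count l : Int))) := by
    unfold PySem.List.max?
    congr 1
    funext acc x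
    cases acc <;> rfl
  rw [hmax]
  cases hm : PySem.List.max? (PySem.Set.ofList ll) (fun l => ((ll.count l : Int))) with
  | none =>
    obtain ⟨x, hx⟩ := List.exists_mem_of_ne_nil ll hll
    have hxmem : x ∈ PySem.Set.ofList ll := (PySem.Set.mem_ofList _ _).mpr hx
    rw [(PySem.List.max?_eq_none_iff _ _).mp hm] at hxmem
    cases hxmem
  | some w => simp

-- ===== VERDICT (by name: the statement is the Claim_ definition above) =====
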